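-- pv_equiv track=rewrite | github.com/YonatanAhituv/discord-role-bot | db.py | indexDataProcessor
-- ===== SOURCE A (Python) =====
-- def indexDataProcessor(keys, userinput):
--     indexes = list(range(1, len(keys) + 1))
--     targetitem = ""
--     indexes = [str(val) for val in indexes]
--     if userinput.lower() in indexes:
--         i = 1
--         for item in keys:
--             if i == int(userinput):
--                 targetitem = str(item)
--             i += 1
--     elif userinput.lower() in [val.lower() for val in keys]:
--         for item in keys:
--             if item.lower() == userinput.lower():
--                 targetitem = str(item)
--     return targetitem
-- ===== SOURCE B (Python) =====
-- def indexDataProcessor(keys, userinput):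
--     u = userinput.lower()
--     if any(str(i + 1) == u for i, _ in enumerate(keys)):
--         v = int(u)
--         return str(keys[v - 1]) if 1 <= v <= len(keys) else ""
--     for item in reversed(keys):
--         if item.lower() == u:
--             return str(item)
--     return ""
-- ===== Notes on version B (the rewrite author's own statement) =====
-- stated objective: simpler
-- what changed: B replaces A's materialised index-string list and counting loop with a lazy any() guard plus one direct index, and replaces A's two-pass case-insensitive search (build a lowered list for membership, then rescan forward keeping the last match) with a single reversed early-exit scan (first match from the right = A's last match from the left).
import Mathlib
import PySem

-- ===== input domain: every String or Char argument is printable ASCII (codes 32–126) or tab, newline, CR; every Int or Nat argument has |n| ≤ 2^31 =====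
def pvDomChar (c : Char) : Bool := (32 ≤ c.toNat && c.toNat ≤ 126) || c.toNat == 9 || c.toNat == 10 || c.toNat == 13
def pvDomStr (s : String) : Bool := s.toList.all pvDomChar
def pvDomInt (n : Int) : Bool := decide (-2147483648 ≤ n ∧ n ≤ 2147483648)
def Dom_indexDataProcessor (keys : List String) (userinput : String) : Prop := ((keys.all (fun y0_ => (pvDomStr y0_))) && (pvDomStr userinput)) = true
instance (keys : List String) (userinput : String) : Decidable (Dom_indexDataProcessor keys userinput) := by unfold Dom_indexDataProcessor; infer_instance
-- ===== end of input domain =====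

-- B drops A's materialised index-string list, counting loop and two-pass name search in favour of
-- a lazy any() guard, one direct index, and a reversed early-exit scan (objective: simpler).


-- ===== PORT A =====
-- `int(userinput)` is reached only under the guard `userinput.lower() in indexes`, where the
-- parse always succeeds in Python; `(…).getD 0` supplies a never-reached default for PySem's Option.
def indexDataProcessor (keys : List String) (userinput : String) : String :=
  let indexes := (PySem.List.pyRange 1 ((keys.length : Int) + 1) 1).map PySem.Int.toStr
  let targetitem := ""
  if PySem.Str.lower userinput ∈ indexes then
    (keys.foldl
      (fun (s : String × Int) item =>
        (if s.2 = (PySem.Int.ofStr? userinput).getD 0 then item else s.1, s.2 + 1))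
      (targetitem, 1)).1
  else if PySem.Str.lower userinput ∈ keys.map PySem.Str.lower then
    keys.foldl
      (fun t item => if PySem.Str.lower item = PySem.Str.lower userinput then item else t)
      targetitem
  else targetitem

-- ===== PORT B =====
-- `for item in reversed(keys): if item.lower() == u: return str(item)` / `return ""`:
-- early-exit loop as structural recursion over keys.reverse
def pvRevFind (u : String) : List String → String
  | [] => ""
  | item :: rest => if PySem.Str.lower item = u then item else pvRevFind u rest

-- `keys[v - 1]` sits under the bounds guard `1 <= v <= len(keys)` (in Python the any() guard
-- already implies it), so PySem.List.pyGetD's default "" is never reached; `int(u)`'s Option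
-- default likewise.
def indexDataProcessor_alt (keys : List String) (userinput : String) : String :=
  let u := PySem.Str.lower userinput
  if (PySem.List.enumerate keys).any (fun p => PySem.Int.toStr (p.1 + 1) == u) then
    let v := (PySem.Int.ofStr? u).getD 0
    if 1 ≤ v ∧ v ≤ (keys.length : Int) then PySem.List.pyGetD keys (v - 1) "" else ""
  else pvRevFind u keys.reverse

-- ===== PRECONDITION & SPEC =====
def Spec_indexDataProcessor (keys : List String) (userinput : String) (out : String) : Prop := out = indexDataProcessor_alt keys userinput
instance (keys : List String) (userinput : String) (out : String) : Decidable (Spec_indexDataProcessor keys userinput out) := by unfold Spec_indexDataProcessor; infer_instance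

-- ===== CLAIM (what is proved, stated in full; the proofs are below) =====
def Claim_equal_indexDataProcessor : Prop := ∀ (keys : List String) (userinput : String), Dom_indexDataProcessor keys userinput → Spec_indexDataProcessor keys userinput (indexDataProcessor keys userinput)

-- ===== LEMMAS AND PROOFS =====

theorem pvDigitChar_bound (k : Nat) (h : k < 10) :
    48 ≤ (Nat.digitChar k).toNat ∧ (Nat.digitChar k).toNat ≤ 57 := by
  interval_cases k <;> simp [Nat.digitChar]

-- every character Nat.toDigitsCore 10 prepends is an ASCII digit
theorem pvToDigitsCore_digits (f : Nat) : ∀ (n : Nat) (l : List Char),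
    (∀ c ∈ l, 48 ≤ c.toNat ∧ c.toNat ≤ 57) →
    ∀ c ∈ Nat.toDigitsCore 10 f n l, 48 ≤ c.toNat ∧ c.toNat ≤ 57 := by
  induction f with
  | zero => intro n l hl c hc; exact hl c hc
  | succ f ih =>
    intro n l hl c hc
    have hd := pvDigitChar_bound (n % 10) (Nat.mod_lt _ (by omega))
    simp only [Nat.toDigitsCore] at hc
    by_cases h0 : n / 10 = 0
    · rw [if_pos h0] at hc
      rcases List.mem_cons.mp hc with h1 | h1
      · subst h1; exact hd
      · exact hl c h1
    · rw [if_neg h0] at hc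
      refine ih (n / 10) _ ?_ c hc
      intro d hd2
      rcases List.mem_cons.mp hd2 with h1 | h1
      · subst h1; exact hd
      · exact hl d h1

theorem pvToDigits_digits (m : Nat) : ∀ c ∈ Nat.toDigits 10 m, 48 ≤ c.toNat ∧ c.toNat ≤ 57 :=
  pvToDigitsCore_digits _ _ _ (by simp)

-- lowering maps no character onto a digit it was not already
theorem pvLowerChar_digit (c d : Char) (h : PySem.Chars.lowerChar c = d)
    (hd : 48 ≤ d.toNat ∧ d.toNat ≤ 57) : c = d := by
  unfold PySem.Chars.lowerChar at h
  split at h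
  · exfalso
    rename_i hu
    simp only [PySem.Chars.isupper, Bool.and_eq_true, decide_eq_true_eq] at hu
    have h1 : 65 ≤ c.toNat := by rw [Char.le_def] at hu; exact hu.1
    have h2 : c.toNat ≤ 90 := by rw [Char.le_def] at hu; exact hu.2
    have : d.toNat = c.toNat + 32 := by
      rw [← h, Char.toNat_ofNat, if_pos (Or.inl (by omega))]
    omega
  · exact h

-- a char list whose lowering is all digits is already those digits
theorem pvLower_digits : ∀ (cs ds : List Char), List.map PySem.Chars.lowerChar cs = ds →
    (∀ d ∈ ds, 48 ≤ d.toNat ∧ d.toNat ≤ 57) → cs = ds := by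
  intro cs
  induction cs with
  | nil => intro ds h _; simpa using h.symm
  | cons c cs ih =>
    intro ds h hd
    cases ds with
    | nil => simp at h
    | cons d ds =>
      simp only [List.map_cons, List.cons.injEq] at h
      have hc := pvLowerChar_digit c d h.1 (hd d (by simp))
      have := ih ds h.2 (fun x hx => hd x (by simp [hx]))
      simp [hc, this]

-- A's counting loop selects the element at (one-based) position v
theorem pvLoopA (v : Int) : ∀ (keys : List String) (i0 : Int) (t : String),
    (keys.foldl
      (fun (s : String × Int) item => (if s.2 = v then item else s.1, s.2 + 1)) (t, i0)).1
    = if i0 ≤ v ∧ v < i0 + keys.length then (keys[(v - i0).toNat]?).getD t else t := by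
  intro keys
  induction keys with
  | nil => intro i0 t; simp
  | cons k ks ih =>
    intro i0 t
    simp only [List.foldl_cons, ih]
    by_cases hv : i0 = v
    · subst hv
      have h1 : ¬ (i0 + 1 ≤ i0 ∧ i0 < i0 + 1 + ks.length) := by omega
      have h2 : i0 ≤ i0 ∧ i0 < i0 + (k :: ks).length := by simp
      rw [if_neg h1, if_pos h2]
      simp
    · by_cases hb : i0 + 1 ≤ v ∧ v < i0 + 1 + ks.length
      · have hb' : i0 ≤ v ∧ v < i0 + (k :: ks).length := by constructor <;> [omega; (simp; omega)]
        have hn : (v - i0).toNat = (v - (i0 + 1)).toNat + 1 := by omega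
        rw [if_pos hb, if_pos hb', if_neg hv, hn]
        simp
      · have hb' : ¬ (i0 ≤ v ∧ v < i0 + (k :: ks).length) := by simp; intro h; omega
        rw [if_neg hb, if_neg hb', if_neg hv]

-- B's lazy any() guard tests exactly A's membership in the index-string list
theorem pvGuard (keys : List String) (u : String) :
    ((PySem.List.enumerate keys).any (fun p => PySem.Int.toStr (p.1 + 1) == u) = true)
    ↔ u ∈ (PySem.List.pyRange 1 ((keys.length : Int) + 1) 1).map PySem.Int.toStr := by
  simp only [List.any_eq_true, List.mem_map, beq_iff_eq]
  constructor
  · rintro ⟨p, hp, hpu⟩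
    obtain ⟨k, hk, rfl⟩ := (PySem.List.mem_enumerate_iff keys 0 p).mp hp
    refine ⟨(k : Int) + 1, PySem.List.mem_pyRange_one.mpr ⟨by omega, by omega⟩, ?_⟩
    simpa using hpu
  · rintro ⟨j, hj, hju⟩
    have hb := PySem.List.mem_pyRange_one.mp hj
    have hklt : (j - 1).toNat < keys.length := by omega
    refine ⟨(0 + ((j - 1).toNat : Int), keys[(j - 1).toNat]'hklt), ?_, ?_⟩
    · exact (PySem.List.mem_enumerate_iff keys 0 _).mpr ⟨(j - 1).toNat, hklt, rfl⟩
    · have hj1 : (0 : Int) + ((j - 1).toNat : Int) + 1 = j := by omega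
      rw [hj1]; exact hju

-- first match from the right, one element appended on the right
theorem pvRevFind_append_singleton (u k : String) : ∀ xs : List String,
    pvRevFind u (xs ++ [k])
    = if xs.any (fun it => PySem.Str.lower it == u) then pvRevFind u xs
      else if PySem.Str.lower k = u then k else "" := by
  intro xs
  induction xs with
  | nil => simp [pvRevFind]
  | cons x xs ih =>
    rw [List.cons_append]
    by_cases hx : PySem.Str.lower x = u
    · have hany : ((x :: xs).any (fun it => PySem.Str.lower it == u)) = true := by
        simp [hx]
      rw [hany, if_pos rfl]
      show (if PySem.Str.lower x = u then x else pvRevFind u (xs ++ [k]))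
        = (if PySem.Str.lower x = u then x else pvRevFind u xs)
      rw [if_pos hx, if_pos hx]
    · have hxb : (PySem.Str.lower x == u) = false := by simp [hx]
      show (if PySem.Str.lower x = u then x else pvRevFind u (xs ++ [k])) = _
      rw [if_neg hx, ih, List.any_cons, hxb, Bool.false_or]
      by_cases ha : (xs.any (fun it => PySem.Str.lower it == u)) = true
      · rw [ha, if_pos rfl, if_pos rfl]
        show _ = (if PySem.Str.lower x = u then x else pvRevFind u xs)
        rw [if_neg hx]
      · rw [Bool.not_eq_true] at ha
        rw [ha]
        simp only [Bool.false_eq_true, if_false]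

-- A's forward last-match fold = B's backward first-match scan (when some key matches)
theorem pvScan (u : String) : ∀ (keys : List String) (t : String),
    keys.foldl (fun t item => if PySem.Str.lower item = u then item else t) t
    = if keys.any (fun it => PySem.Str.lower it == u) then pvRevFind u keys.reverse else t := by
  intro keys
  induction keys with
  | nil => intro t; simp
  | cons k ks ih =>
    intro t
    rw [List.foldl_cons, ih, List.reverse_cons, pvRevFind_append_singleton, List.any_reverse,
      List.any_cons]
    by_cases hk : PySem.Str.lower k = u
    · have hkb : (PySem.Str.lower k == u) = true := by simp [hk]
      rw [hkb, Bool.true_or, if_pos rfl, if_pos hk]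
      by_cases ha : (ks.any (fun it => PySem.Str.lower it == u)) = true
      · rw [ha, if_pos rfl, if_pos rfl]
      · rw [Bool.not_eq_true] at ha
        rw [ha]
        simp only [Bool.false_eq_true, if_false, if_pos hk]
    · have hkb : (PySem.Str.lower k == u) = false := by simp [hk]
      rw [hkb, Bool.false_or, if_neg hk]
      by_cases ha : (ks.any (fun it => PySem.Str.lower it == u)) = true
      · rw [ha, if_pos rfl, if_pos rfl, if_pos rfl]
      · rw [Bool.not_eq_true] at ha
        rw [ha]
        simp only [Bool.false_eq_true, if_false]

-- no case-insensitive match ⇒ the backward scan falls through to ""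
theorem pvRevFind_no_match (u : String) : ∀ xs : List String,
    (∀ it ∈ xs, PySem.Str.lower it ≠ u) → pvRevFind u xs = "" := by
  intro xs
  induction xs with
  | nil => intro _; rfl
  | cons x xs ih =>
    intro h
    show (if PySem.Str.lower x = u then x else pvRevFind u xs) = ""
    rw [if_neg (h x (by simp))]
    exact ih (fun it hit => h it (by simp [hit]))

theorem pvMain (keys : List String) (userinput : String) :
    indexDataProcessor keys userinput = indexDataProcessor_alt keys userinput := by
  simp only [indexDataProcessor, indexDataProcessor_alt]
  by_cases hg : PySem.Str.lower userinput
      ∈ (PySem.List.pyRange 1 ((keys.length : Int) + 1) 1).map PySem.Int.toStr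
  · rw [if_pos hg, if_pos ((pvGuard keys (PySem.Str.lower userinput)).mpr hg)]
    obtain ⟨k, hk, hku⟩ := List.mem_map.mp hg
    have hkb := PySem.List.mem_pyRange_one.mp hk
    have hlist : userinput.toList = (PySem.Str.lower userinput).toList := by
      have h1 : (PySem.Str.lower userinput).toList = PySem.Int.toChars k := by
        rw [← hku, PySem.Int.toList_toStr]
      have h2 : PySem.Int.toChars k = Nat.toDigits 10 k.toNat := by
        unfold PySem.Int.toChars; rw [if_neg (by omega)]
      have h3 : List.map PySem.Chars.lowerChar userinput.toList
          = (PySem.Str.lower userinput).toList := by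
        rw [PySem.Str.toList_lower]; rfl
      rw [h1, h2] at h3 ⊢
      exact pvLower_digits _ _ h3 (pvToDigits_digits k.toNat)
    have hparse : PySem.Int.ofStr? userinput = PySem.Int.ofStr? (PySem.Str.lower userinput) := by
      unfold PySem.Int.ofStr?; rw [hlist]
    rw [hparse, pvLoopA ((PySem.Int.ofStr? (PySem.Str.lower userinput)).getD 0) keys 1 ""]
    set v := (PySem.Int.ofStr? (PySem.Str.lower userinput)).getD 0 with hv
    by_cases hvb : 1 ≤ v ∧ v ≤ (keys.length : Int)
    · rw [if_pos ⟨hvb.1, by omega⟩, if_pos hvb,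
        PySem.List.pyGetD_eq_getElem keys "" (by omega) (by omega),
        List.getElem?_eq_getElem (by omega)]
      simp
    · rw [if_neg (by omega), if_neg hvb]
  · have hgb : ((PySem.List.enumerate keys).any
        (fun p => PySem.Int.toStr (p.1 + 1) == PySem.Str.lower userinput)) = false := by
      rw [Bool.eq_false_iff]
      exact fun h => hg ((pvGuard keys (PySem.Str.lower userinput)).mp h)
    rw [if_neg hg, hgb]
    simp only [Bool.false_eq_true, if_false]
    by_cases hm : PySem.Str.lower userinput ∈ keys.map PySem.Str.lower
    · rw [if_pos hm, pvScan (PySem.Str.lower userinput) keys ""]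
      obtain ⟨x, hx, hxu⟩ := List.mem_map.mp hm
      rw [if_pos (List.any_eq_true.mpr ⟨x, hx, by simp [hxu]⟩)]
    · rw [if_neg hm, pvRevFind_no_match (PySem.Str.lower userinput) keys.reverse
        (fun it hit heq => hm (List.mem_map.mpr ⟨it, List.mem_reverse.mp hit, heq⟩))]

-- ===== VERDICT (by name: the statement is the Claim_ definition above) =====
theorem indexDataProcessor_spec : Claim_equal_indexDataProcessor := by
  intro keys userinput _
  exact pvMain keys userinput
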